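-- pv_equiv track=rewrite | github.com/Arsen1302/Code-copy-detector | TestData/solutions/problem_1043_2.py | solution_1043_2
-- ===== SOURCE A (Python) =====
-- from typing import List
--
-- def solution_1043_2(nums: List[int], target: int) -> int:
--     d = {0:0}
--     rangeListF = []
--     sm = 0
--     for i in range(len(nums)):
--         sm += nums[i]
--         if sm - target in d:
--             if len(rangeListF) == 0 or d[sm - target] > rangeListF[-1][1]:
--                 rangeListF.append([d[sm - target], i])
--             else:
--                 pass
--         d[sm] = i+1
--     return len(rangeListF)
-- ===== SOURCE B (Python) =====
-- def solution_1043_2(nums, target):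
--     seen = {0}
--     prefix = 0
--     count = 0
--     for x in nums:
--         prefix += x
--         if prefix - target in seen:
--             count += 1
--             seen = {prefix}
--         else:
--             seen.add(prefix)
--     return count
-- ===== Notes on version B (the rewrite author's own statement) =====
-- stated objective: simpler
-- what changed: B replaces A's prefix-sum-to-index dict plus list of chosen [start,end] ranges with index comparisons by the canonical greedy: a resettable set of prefix sums and a counter, reset to {prefix} whenever a subarray is counted.
import Mathlib
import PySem

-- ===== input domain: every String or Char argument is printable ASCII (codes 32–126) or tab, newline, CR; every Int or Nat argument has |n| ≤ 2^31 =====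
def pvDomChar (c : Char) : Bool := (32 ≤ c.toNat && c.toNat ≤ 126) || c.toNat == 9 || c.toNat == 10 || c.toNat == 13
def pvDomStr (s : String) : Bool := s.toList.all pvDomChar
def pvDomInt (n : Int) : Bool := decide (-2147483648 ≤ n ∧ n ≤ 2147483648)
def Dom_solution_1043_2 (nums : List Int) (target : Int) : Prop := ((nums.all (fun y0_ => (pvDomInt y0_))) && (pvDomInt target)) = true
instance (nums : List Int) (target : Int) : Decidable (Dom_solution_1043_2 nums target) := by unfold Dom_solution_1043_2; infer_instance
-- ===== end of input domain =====

-- B replaces A's prefix-sum→index dict plus list of chosen [start,end] ranges by the canonical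
-- greedy with a resettable set of prefix sums and a counter (objective: simpler).

-- ===== PORT A =====
-- one loop iteration of A: state (d, rangeListF, sm), element (i, nums[i]) from enumerate
def stepA (target : Int) (st : PySem.Dict Int Int × List (Int × Int) × Int)
    (iv : Int × Int) : PySem.Dict Int Int × List (Int × Int) × Int :=
  let sm := st.2.2 + iv.2
  let lst :=
    match st.1.get? (sm - target) with
    | some j =>
      match st.2.1.getLast? with
      | none => st.2.1 ++ [(j, iv.1)]
      | some pr => if j > pr.2 then st.2.1 ++ [(j, iv.1)] else st.2.1
    | none => st.2.1
  (st.1.insert sm (iv.1 + 1), lst, sm)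

def solution_1043_2 (nums : List Int) (target : Int) : Int :=
  (((PySem.List.enumerate nums).foldl (stepA target)
      (PySem.Dict.ofList [((0 : Int), (0 : Int))], ([] : List (Int × Int)), 0)).2.1.length : Int)

-- ===== PORT B =====
-- one loop iteration of B: state (seen, prefix, count)
def stepB (target : Int) (st : PySem.Set Int × Int × Int) (x : Int) :
    PySem.Set Int × Int × Int :=
  let p := st.2.1 + x
  if p - target ∈ st.1 then (PySem.Set.ofList [p], p, st.2.2 + 1)
  else (PySem.Set.add st.1 p, p, st.2.2)

def solution_1043_2_alt (nums : List Int) (target : Int) : Int :=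
  (nums.foldl (stepB target) (PySem.Set.ofList [(0 : Int)], 0, 0)).2.2

-- ===== PRECONDITION & SPEC =====
def Spec_solution_1043_2 (nums : List Int) (target : Int) (out : Int) : Prop := out = solution_1043_2_alt nums target
instance (nums : List Int) (target : Int) (out : Int) : Decidable (Spec_solution_1043_2 nums target out) := by unfold Spec_solution_1043_2; infer_instance

-- ===== CLAIM (what is proved, stated in full; the proofs are below) =====
def Claim_equal_solution_1043_2 : Prop := ∀ (nums : List Int) (target : Int), Dom_solution_1043_2 nums target → Spec_solution_1043_2 nums target (solution_1043_2 nums target)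

-- ===== LEMMAS AND PROOFS =====

-- position after the last chosen range (0 if none): A counts a new range [j, i] iff lendA lst ≤ j
def lendA (lst : List (Int × Int)) : Int :=
  match lst.getLast? with
  | none => 0
  | some pr => pr.2 + 1

theorem lendA_concat (lst : List (Int × Int)) (pr : Int × Int) :
    lendA (lst ++ [pr]) = pr.2 + 1 := by
  simp [lendA]

-- coupling invariant: A's (d, lst) and B's seen describe the same "usable prefix positions"
theorem loop_eq (target : Int) (nums : List Int) (s : Int)
    (d : PySem.Dict Int Int) (lst : List (Int × Int)) (p c : Int) (seen : PySem.Set Int)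
    (hs : 0 ≤ s)
    (hb : ∀ v j, d.get? v = some j → 0 ≤ j ∧ j ≤ s)
    (hl : lendA lst ≤ s)
    (hm : ∀ v : Int, v ∈ seen ↔ ∃ j, d.get? v = some j ∧ lendA lst ≤ j) :
    ((((PySem.List.enumerate nums s).foldl (stepA target) (d, lst, p)).2.1.length : Int)) + c
      = (nums.foldl (stepB target) (seen, p, c)).2.2 + (lst.length : Int) := by
  induction nums generalizing s d lst p c seen with
  | nil => simp [PySem.List.enumerate_nil]; omega
  | cons x xs ih =>
    rw [PySem.List.enumerate_cons]
    simp only [List.foldl_cons]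
    by_cases hmem : (p + x) - target ∈ seen
    · -- B counts; A appends a range
      obtain ⟨j, hj, hlj⟩ := (hm _).1 hmem
      have hjb := hb _ _ hj
      have hA : stepA target (d, lst, p) (s, x)
          = (d.insert (p + x) (s + 1), lst ++ [(j, s)], p + x) := by
        simp only [stepA, hj]
        cases hlast : lst.getLast? with
        | none => rfl
        | some pr =>
          have : pr.2 < j := by
            have : lendA lst = pr.2 + 1 := by simp [lendA, hlast]
            omega
          simp [this]
      have hB : stepB target (seen, p, c) x
          = (PySem.Set.ofList [p + x], p + x, c + 1) := by
        simp [stepB, hmem]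
      rw [hA, hB]
      have hcon : lendA (lst ++ [(j, s)]) = s + 1 := by simp [lendA_concat]
      have := ih (s + 1) (d.insert (p + x) (s + 1)) (lst ++ [(j, s)]) (p + x) (c + 1)
        (PySem.Set.ofList [p + x]) (by omega)
        (by
          intro v j' h
          by_cases hv : v = p + x
          · subst hv
            rw [PySem.Dict.get?_insert_self] at h
            simp only [Option.some.injEq] at h
            omega
          · rw [PySem.Dict.get?_insert_of_ne d _ hv] at h
            have := hb _ _ h
            omega)
        (by rw [hcon])
        (by
          intro v
          rw [PySem.Set.mem_ofList, hcon]
          constructor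
          · intro hv
            have hv' : v = p + x := by simpa using hv
            subst hv'
            exact ⟨s + 1, PySem.Dict.get?_insert_self d _ _, le_rfl⟩
          · rintro ⟨j', hj', hlj'⟩
            by_cases hv : v = p + x
            · simp [hv]
            · rw [PySem.Dict.get?_insert_of_ne d _ hv] at hj'
              have := hb _ _ hj'
              omega)
      simp only [List.length_append, List.length_singleton] at this ⊢
      push_cast at this ⊢
      omega
    · -- B does not count; A does not append
      have hA : stepA target (d, lst, p) (s, x)
          = (d.insert (p + x) (s + 1), lst, p + x) := by
        simp only [stepA]
        cases hj : d.get? ((p + x) - target) with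
        | none => rfl
        | some j =>
          have hnle : ¬ lendA lst ≤ j := fun hle => hmem ((hm _).2 ⟨j, hj, hle⟩)
          cases hlast : lst.getLast? with
          | none =>
            exfalso
            have h0 : lendA lst = 0 := by simp [lendA, hlast]
            have := (hb _ _ hj).1
            omega
          | some pr =>
            have : ¬ (j > pr.2) := by
              have : lendA lst = pr.2 + 1 := by simp [lendA, hlast]
              omega
            simp [this]
      have hB : stepB target (seen, p, c) x
          = (PySem.Set.add seen (p + x), p + x, c) := by
        simp [stepB, hmem]
      rw [hA, hB]
      exact ih (s + 1) (d.insert (p + x) (s + 1)) lst (p + x) c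
        (PySem.Set.add seen (p + x)) (by omega)
        (by
          intro v j' h
          by_cases hv : v = p + x
          · subst hv
            rw [PySem.Dict.get?_insert_self] at h
            simp only [Option.some.injEq] at h
            omega
          · rw [PySem.Dict.get?_insert_of_ne d _ hv] at h
            have := hb _ _ h
            omega)
        (by omega)
        (by
          intro v
          rw [PySem.Set.mem_add]
          by_cases hv : v = p + x
          · subst hv
            constructor
            · intro _
              exact ⟨s + 1, PySem.Dict.get?_insert_self d _ _, by omega⟩
            · intro _
              exact Or.inr rfl
          · rw [PySem.Dict.get?_insert_of_ne d _ hv]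
            constructor
            · rintro (h | h)
              · exact (hm _).1 h
              · exact absurd h hv
            · intro h
              exact Or.inl ((hm _).2 h))

-- ===== VERDICT (by name: the statement is the Claim_ definition above) =====
theorem solution_1043_2_spec : Claim_equal_solution_1043_2 := by
  intro nums target _
  unfold Spec_solution_1043_2 solution_1043_2 solution_1043_2_alt
  have hd : ∀ v : Int, (PySem.Dict.ofList [((0 : Int), (0 : Int))]).get? v
      = if v = 0 then some 0 else none := by
    intro v
    have he : PySem.Dict.ofList [((0 : Int), (0 : Int))]
        = PySem.Dict.mk [((0 : Int), (0 : Int))] := by decide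
    rw [he, PySem.Dict.get?_mk_cons]
    by_cases hv : v = 0
    · simp [hv]
    · simp [hv, Ne.symm hv, PySem.Dict.get?]
  have h := loop_eq target nums 0 (PySem.Dict.ofList [((0 : Int), (0 : Int))]) [] 0 0
    (PySem.Set.ofList [(0 : Int)]) le_rfl
    (by
      intro v j h
      rw [hd] at h
      split at h
      · simp only [Option.some.injEq] at h
        omega
      · exact absurd h (by simp))
    (by simp [lendA])
    (by
      intro v
      rw [PySem.Set.mem_ofList]
      constructor
      · intro hv
        have hv' : v = 0 := by simpa using hv
        subst hv'
        exact ⟨0, by rw [hd]; simp, by simp [lendA]⟩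
      · rintro ⟨j, hj, _⟩
        rw [hd] at hj
        split at hj
        · simp_all
        · exact absurd hj (by simp))
  simpa using h
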